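-- pv_equiv track=rewrite | github.com/text2phenotype/biomed | biomed/tests/experiment/mimic/test_biomed_1452.py | __get_updated_annotation_indices
-- ===== SOURCE A (Python) =====
-- from typing import Dict, Iterable, Set, List, Tuple
--
-- def __get_updated_annotation_indices(annotation_locs: List[List[Tuple[int, int]]],
--                                      substitution_map: Dict[Tuple[int, int], str]) -> List[List[Tuple[int, int]]]:
--     for indices, sub_text in substitution_map.items():
--         sub_start = indices[0]
--         sub_offset = len(sub_text) - (indices[1] - sub_start)
--
--         offset_locations = []
--         for annotation_loc in annotation_locs:
--             offset_location = []
--             for r in annotation_loc: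
--                 if r[0] >= sub_start:
--                     offset_location.append((r[0] + sub_offset, r[1] + sub_offset))
--                 else:
--                     offset_location.append(r)
--
--             offset_locations.append(offset_location)
--
--         annotation_locs = offset_locations
--
--     return annotation_locs
-- ===== SOURCE B (Python) =====
-- from typing import Dict, List, Tuple
--
-- def __get_updated_annotation_indices(annotation_locs: List[List[Tuple[int, int]]],
--                                      substitution_map: Dict[Tuple[int, int], str]) -> List[List[Tuple[int, int]]]:
--     # Each range evolves independently: thread one (start, end) through all
--     # substitutions instead of rebuilding the whole list per substitution.
--     result = []
--     for annotation_loc in annotation_locs: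
--         new_loc = []
--         for start, end in annotation_loc:
--             for (i0, i1), sub_text in substitution_map.items():
--                 off = len(sub_text) - (i1 - i0)
--                 if start >= i0:
--                     start += off
--                     end += off
--             new_loc.append((start, end))
--         result.append(new_loc)
--     return result
-- ===== Notes on version B (the rewrite author's own statement) =====
-- stated objective: alternative
-- what changed: Loop interchange with a per-range accumulator: instead of the outer loop over substitutions rebuilding the entire annotation list each pass, B walks each range once and folds all substitution offsets into a single running (start, end).
import Mathlib
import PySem

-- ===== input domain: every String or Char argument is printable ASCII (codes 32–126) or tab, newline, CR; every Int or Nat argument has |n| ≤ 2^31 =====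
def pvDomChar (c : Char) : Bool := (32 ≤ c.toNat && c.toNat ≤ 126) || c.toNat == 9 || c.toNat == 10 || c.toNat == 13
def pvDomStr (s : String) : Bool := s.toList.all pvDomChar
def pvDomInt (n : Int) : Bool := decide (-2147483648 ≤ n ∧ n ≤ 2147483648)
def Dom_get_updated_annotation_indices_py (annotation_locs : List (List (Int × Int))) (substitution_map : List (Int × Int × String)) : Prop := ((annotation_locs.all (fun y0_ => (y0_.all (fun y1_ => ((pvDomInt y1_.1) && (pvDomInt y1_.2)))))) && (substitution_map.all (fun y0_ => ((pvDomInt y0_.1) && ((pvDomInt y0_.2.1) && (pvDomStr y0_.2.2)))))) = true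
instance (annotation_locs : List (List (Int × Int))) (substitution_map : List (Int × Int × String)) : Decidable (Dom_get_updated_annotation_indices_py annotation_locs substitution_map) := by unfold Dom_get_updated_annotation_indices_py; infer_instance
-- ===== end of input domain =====

-- B replaces A's outer loop over substitutions (which rebuilds the whole annotation list each pass)
-- by a single pass per range that folds all substitution offsets into one running (start, end): alternative decomposition.

-- ===== PORT A =====
def get_updated_annotation_indices_py (annotation_locs : List (List (Int × Int))) (substitution_map : List (Int × Int × String)) : List (List (Int × Int)) :=
  substitution_map.foldl (fun locs s =>
    let sub_start := s.1
    let sub_offset := PySem.Str.len s.2.2 - (s.2.1 - sub_start)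
    locs.foldl (fun offset_locations annotation_loc =>
      offset_locations ++ [annotation_loc.foldl (fun offset_location r =>
        if r.1 ≥ sub_start then offset_location ++ [(r.1 + sub_offset, r.2 + sub_offset)]
        else offset_location ++ [r]) []]) []) annotation_locs

-- ===== PORT B =====
def get_updated_annotation_indices_py_alt (annotation_locs : List (List (Int × Int))) (substitution_map : List (Int × Int × String)) : List (List (Int × Int)) :=
  annotation_locs.map (fun annotation_loc =>
    annotation_loc.map (fun r =>
      substitution_map.foldl (fun (se : Int × Int) s =>
        let off := PySem.Str.len s.2.2 - (s.2.1 - s.1)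
        if se.1 ≥ s.1 then (se.1 + off, se.2 + off) else se) r))

-- ===== PRECONDITION & SPEC =====
def Spec_get_updated_annotation_indices_py (annotation_locs : List (List (Int × Int))) (substitution_map : List (Int × Int × String)) (out : List (List (Int × Int))) : Prop := out = get_updated_annotation_indices_py_alt annotation_locs substitution_map
instance (annotation_locs : List (List (Int × Int))) (substitution_map : List (Int × Int × String)) (out : List (List (Int × Int))) : Decidable (Spec_get_updated_annotation_indices_py annotation_locs substitution_map out) := by unfold Spec_get_updated_annotation_indices_py; infer_instance

-- ===== CLAIM (what is proved, stated in full; the proofs are below) =====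
def Claim_equal_get_updated_annotation_indices_py : Prop := ∀ (annotation_locs : List (List (Int × Int))) (substitution_map : List (Int × Int × String)), Dom_get_updated_annotation_indices_py annotation_locs substitution_map → Spec_get_updated_annotation_indices_py annotation_locs substitution_map (get_updated_annotation_indices_py annotation_locs substitution_map)

-- ===== LEMMAS AND PROOFS =====

-- the per-range step: what one substitution does to one range
def pvStep (s : Int × Int × String) (r : Int × Int) : Int × Int :=
  let off := PySem.Str.len s.2.2 - (s.2.1 - s.1)
  if r.1 ≥ s.1 then (r.1 + off, r.2 + off) else r

-- an append-accumulator loop with a branch is a map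
theorem foldl_append_branch (ss off : Int) (acc : List (Int × Int)) (xs : List (Int × Int)) :
    xs.foldl (fun offset_location r =>
      if r.1 ≥ ss then offset_location ++ [(r.1 + off, r.2 + off)]
      else offset_location ++ [r]) acc
    = acc ++ xs.map (fun r => if r.1 ≥ ss then (r.1 + off, r.2 + off) else r) := by
  induction xs generalizing acc with
  | nil => simp
  | cons x t ih => simp only [List.foldl, List.map]; split_ifs <;> simp [ih]

theorem foldl_append_map {α β : Type} (f : α → β) (acc : List β) (xs : List α) :
    xs.foldl (fun a x => a ++ [f x]) acc = acc ++ xs.map f := by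
  induction xs generalizing acc with
  | nil => simp
  | cons x t ih => simp [List.foldl, ih]

-- one pass of A's outer loop is an elementwise map of pvStep
theorem passA_eq (s : Int × Int × String) (locs : List (List (Int × Int))) :
    locs.foldl (fun offset_locations annotation_loc =>
      offset_locations ++ [annotation_loc.foldl (fun offset_location r =>
        if r.1 ≥ s.1 then offset_location ++ [(r.1 + (PySem.Str.len s.2.2 - (s.2.1 - s.1)), r.2 + (PySem.Str.len s.2.2 - (s.2.1 - s.1)))]
        else offset_location ++ [r]) []]) []
    = locs.map (fun loc => loc.map (pvStep s)) := by
  have h : ∀ loc : List (Int × Int), loc.foldl (fun offset_location r =>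
        if r.1 ≥ s.1 then offset_location ++ [(r.1 + (PySem.Str.len s.2.2 - (s.2.1 - s.1)), r.2 + (PySem.Str.len s.2.2 - (s.2.1 - s.1)))]
        else offset_location ++ [r]) [] = loc.map (pvStep s) := by
    intro loc
    rw [foldl_append_branch]
    simp [pvStep]
  simp only [h]
  simpa using foldl_append_map (fun loc => loc.map (pvStep s)) [] locs

-- main commuting lemma: folding per-list-of-lists equals mapping the per-range fold
theorem commute (subs : List (Int × Int × String)) (locs : List (List (Int × Int))) :
    subs.foldl (fun L s => L.map (fun loc => loc.map (pvStep s))) locs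
    = locs.map (fun loc => loc.map (fun r => subs.foldl (fun se s => pvStep s se) r)) := by
  induction subs generalizing locs with
  | nil => simp
  | cons s rest ih =>
      simp only [List.foldl, ih, List.map_map]
      simp [Function.comp_def, List.map_map]

-- ===== VERDICT (by name: the statement is the Claim_ definition above) =====
theorem get_updated_annotation_indices_py_spec : Claim_equal_get_updated_annotation_indices_py := by
  intro locs subs hd
  clear hd
  unfold Spec_get_updated_annotation_indices_py get_updated_annotation_indices_py get_updated_annotation_indices_py_alt
  have hA : ∀ L : List (List (Int × Int)),
      subs.foldl (fun locs s =>
        locs.foldl (fun offset_locations annotation_loc =>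
          offset_locations ++ [annotation_loc.foldl (fun offset_location r =>
            if r.1 ≥ s.1 then offset_location ++ [(r.1 + (PySem.Str.len s.2.2 - (s.2.1 - s.1)), r.2 + (PySem.Str.len s.2.2 - (s.2.1 - s.1)))]
            else offset_location ++ [r]) []]) []) L
      = subs.foldl (fun L s => L.map (fun loc => loc.map (pvStep s))) L := by
    intro L
    induction subs generalizing L with
    | nil => rfl
    | cons s rest ih => rw [List.foldl_cons, List.foldl_cons, passA_eq]; apply ih
  simp only [hA, commute]
  rfl
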